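-- pv_equiv track=rewrite | github.com/yakubinfo/bioinformatics | helpers.py | find_balanced_brackets
-- ===== SOURCE A (Python) =====
-- def find_balanced_brackets(string):
--     bracket_level=0
--     for i in range(len(string)):
--         if string[i]=='(':
--             bracket_level+=1
--         if string[i]==')':
--             bracket_level-=1
--             if bracket_level==0:
--                 return i
-- ===== SOURCE B (Python) =====
-- def find_balanced_brackets(string):
--     # pass 1: running bracket balance
--     bal = []
--     level = 0
--     for c in string:
--         level += (c == '(') - (c == ')')
--         bal.append(level)
--     # pass 2: first ')' where the balance closes at 0
--     for i, b in enumerate(bal):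
--         if b == 0 and string[i] == ')':
--             return i
-- ===== Notes on version B (the rewrite author's own statement) =====
-- stated objective: alternative
-- what changed: Replaces the single early-return counter loop by two passes: first build the running bracket-balance table, then search it for the first index whose balance is 0 at a ')'.
import Mathlib
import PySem

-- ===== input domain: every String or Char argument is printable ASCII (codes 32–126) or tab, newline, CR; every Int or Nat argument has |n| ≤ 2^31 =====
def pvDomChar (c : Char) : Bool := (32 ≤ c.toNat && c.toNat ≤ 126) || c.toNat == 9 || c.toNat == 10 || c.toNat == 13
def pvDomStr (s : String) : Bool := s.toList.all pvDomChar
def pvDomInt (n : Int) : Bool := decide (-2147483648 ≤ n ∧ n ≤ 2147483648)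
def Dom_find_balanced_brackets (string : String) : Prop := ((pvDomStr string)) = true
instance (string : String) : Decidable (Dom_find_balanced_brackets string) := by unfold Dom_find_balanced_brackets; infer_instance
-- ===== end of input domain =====

-- ===== PORT A =====
-- Port of A: single counter loop with early return.
def pvGoA : List Char → Int → Int → Option Int
  | [], _, _ => none
  | c :: rest, i, lvl =>
    let lvl1 := if c = '(' then lvl + 1 else lvl
    if c = ')' then
      if lvl1 - 1 = 0 then some i else pvGoA rest (i + 1) (lvl1 - 1)
    else pvGoA rest (i + 1) lvl1

def find_balanced_brackets (string : String) : Option Int :=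
  pvGoA string.toList 0 0

-- ===== PORT B =====
-- Port of B: pass 1 builds the running balance table, pass 2 searches it.
def pvBal : List Char → Int → List Int
  | [], _ => []
  | c :: rest, lvl =>
    let lvl' := lvl + (if c = '(' then 1 else 0) - (if c = ')' then 1 else 0)
    lvl' :: pvBal rest lvl'

def pvGoB : List (Int × Char) → Int → Option Int
  | [], _ => none
  | (b, c) :: rest, i => if b = 0 ∧ c = ')' then some i else pvGoB rest (i + 1)

def find_balanced_brackets_alt (string : String) : Option Int :=
  pvGoB ((pvBal string.toList 0).zip string.toList) 0

-- ===== PRECONDITION & SPEC =====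
def Spec_find_balanced_brackets (string : String) (out : Option Int) : Prop := out = find_balanced_brackets_alt string
instance (string : String) (out : Option Int) : Decidable (Spec_find_balanced_brackets string out) := by unfold Spec_find_balanced_brackets; infer_instance

-- ===== CLAIM (what is proved, stated in full; the proofs are below) =====
def Claim_equal_find_balanced_brackets : Prop := ∀ (string : String), Dom_find_balanced_brackets string → Spec_find_balanced_brackets string (find_balanced_brackets string)

-- ===== LEMMAS AND PROOFS =====
lemma pv_key : ∀ (cs : List Char) (i lvl : Int),
    pvGoA cs i lvl = pvGoB ((pvBal cs lvl).zip cs) i := by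
  intro cs
  induction cs with
  | nil => intro i lvl; rfl
  | cons c rest ih =>
    intro i lvl
    by_cases hc : c = ')'
    · subst hc
      simp [pvGoA, pvBal, pvGoB, ih]
    · by_cases ho : c = '('
      · subst ho
        simp [pvGoA, pvBal, pvGoB, ih]
      · simp [pvGoA, pvBal, pvGoB, hc, ho, ih]

-- ===== VERDICT (by name: the statement is the Claim_ definition above) =====
theorem find_balanced_brackets_spec : Claim_equal_find_balanced_brackets := by
  intro s _
  unfold Spec_find_balanced_brackets find_balanced_brackets find_balanced_brackets_alt
  exact pv_key s.toList 0 0
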